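-- pv_equiv track=rewrite | github.com/umairz5723/Coachable-Umair-Zaib-Repository | leetcode/ibm_max_subject_number.py | max_subjects_number
-- ===== SOURCE A (Python) =====
-- from typing import List
--
-- def max_subjects_number(answered: List[int], needed: List[int], q: int) -> int:
--     """
--     This function returns the number of
--     subjects we can pass based on
--     the number of questions already
--     answered (answered_list) and the
--     questions needed to pass a given
--     subject (index). We are given an
--     integer "q" that represents the number
--     of questions we can answer.
--
--     The goal is the answer as many questions
--     as possible such that we can pass as
--     many subjects as possible. This means we
--     must distribute q across answered[i] such that
--     we can bring up the value at a given index to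
--     meet the value at needed[i].
--
--     The process:
--         1. Calculate the remaining questions need for each
--         index. In the event that we answered more questions
--         than needed, we set the remaining for that given
--         index to 0.
--
--         2. Sort the remaining questions so we can increment
--         the indexes with the least "needed" questions.
--
--         3. Loop over the sorted remaining questions list and
--         verify that we have enough "q" remaining, if so we can
--         get the difference of q and the current required value. We
--         add one to the passed_subjects when this occurs to represent
--         that we have answered the needed questions.
--         Should our value of "q" be less than the "req", we can break
--         the look because we know the value of "req" will remain the same
--         or increment in value.
--     """
--     # Step 1: Calculate remaining questions needed for each subject
--     remaining = []
--     for i in range(len(answered)):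
--         remaining.append(max(0,needed[i] - answered[i]))
--
--     # Step 2: Sort the remaining question in asc order
--     # So we can answer as many remaning questions as possible
--     remaining.sort()
--
--     # Step 3: Allocate questions and count passed subjects
--     passed_subjects = 0
--     for req in remaining:
--         if q >= req:
--             q -= req
--             passed_subjects += 1
--         else:
--             break
--
--     return passed_subjects
-- ===== SOURCE B (Python) =====
-- import bisect
--
-- def max_subjects_number(answered, needed, q):
--     # Online exchange algorithm: scan subjects in given order, keep the set of
--     # subjects we currently pay for (a sorted list of their costs); whenever the
--     # running cost exceeds q, evict the most expensive kept subject. The kept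
--     # set is always a maximum-size affordable set of the subjects seen so far.
--     kept = []          # sorted costs of the subjects currently selected
--     total = 0          # sum(kept)
--     for a, n in zip(answered, needed):
--         cost = max(0, n - a)
--         bisect.insort(kept, cost)
--         total += cost
--         if total > q:
--             total -= kept.pop()   # evict the most expensive selected subject
--     return len(kept)
-- ===== Notes on version B (the rewrite author's own statement) =====
-- stated objective: alternative
-- what changed: Replaces A's sort-all-deficits-then-greedy-consume loop by an online exchange algorithm: scan subjects in their original order keeping a sorted pool of currently selected costs (bisect.insort) and a running total, evicting the most expensive selected subject whenever the total exceeds q; the pool size at the end is the answer (correct by the classic exchange argument: the kept pool is always a maximum-size affordable subset of the subjects seen so far).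
import Mathlib
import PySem

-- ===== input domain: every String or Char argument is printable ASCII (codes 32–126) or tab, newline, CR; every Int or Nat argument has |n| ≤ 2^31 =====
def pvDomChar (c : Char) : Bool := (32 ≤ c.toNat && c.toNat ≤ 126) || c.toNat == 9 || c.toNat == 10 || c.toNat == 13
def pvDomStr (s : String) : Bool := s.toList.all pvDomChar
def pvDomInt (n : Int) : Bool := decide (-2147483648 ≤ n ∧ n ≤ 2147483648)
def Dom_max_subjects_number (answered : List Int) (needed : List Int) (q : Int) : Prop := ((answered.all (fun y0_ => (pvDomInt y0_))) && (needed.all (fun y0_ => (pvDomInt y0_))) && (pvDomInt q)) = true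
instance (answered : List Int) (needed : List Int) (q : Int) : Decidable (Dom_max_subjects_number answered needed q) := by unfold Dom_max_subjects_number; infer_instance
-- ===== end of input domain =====

-- B replaces A's sort-then-greedy-consume loop by an online exchange algorithm:
-- scan subjects in original order, keep a sorted pool of selected costs, evict
-- the most expensive selected cost whenever the running total exceeds q
-- (objective: alternative algorithm, same result).

-- ===== PORT A =====
-- Step-3 for-loop with break: recursion over the sorted list carrying (q, passed_subjects)
def pvLoopA : List Int → Int → Int → Int
  | [], _, passed => passed
  | req :: rest, q, passed => if q ≥ req then pvLoopA rest (q - req) (passed + 1) else passed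

def max_subjects_number (answered : List Int) (needed : List Int) (q : Int) : Int :=
  let remaining := (PySem.List.pyRange 0 (answered.length : Int) 1).foldl
    (fun acc i => acc ++ [max 0 (PySem.List.pyGetD needed i 0 - PySem.List.pyGetD answered i 0)]) []
  let remainingS := PySem.List.sorted remaining (fun x => x) false
  pvLoopA remainingS q 0

-- ===== PORT B =====
-- bisect.insort into a sorted list (insertion after equal elements; on Int
-- equal elements are identical, so this is the same list bisect produces)
def pvInsort (x : Int) : List Int → List Int
  | [] => [x]
  | y :: rest => if y ≤ x then y :: pvInsort x rest else x :: y :: rest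

-- the for-loop over zip(answered, needed) carrying (kept, total);
-- kept.pop() = drop the last element (kept is nonempty there, so getLastD is exact)
def pvLoopB (q : Int) : List (Int × Int) → List Int → Int → Int
  | [], kept, _ => (kept.length : Int)
  | p :: rest, kept, total =>
    let cost := max 0 (p.2 - p.1)
    let k' := pvInsort cost kept
    let t' := total + cost
    if t' > q then pvLoopB q rest k'.dropLast (t' - k'.getLastD 0)
    else pvLoopB q rest k' t'

def max_subjects_number_alt (answered : List Int) (needed : List Int) (q : Int) : Int :=
  pvLoopB q (answered.zip needed) [] 0

-- ===== PRECONDITION & SPEC =====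
-- Pre_ excludes only the inputs where A raises IndexError (needed shorter than answered).
def Pre_max_subjects_number (answered : List Int) (needed : List Int) (q : Int) : Prop :=
  answered.length ≤ needed.length
instance (answered : List Int) (needed : List Int) (q : Int) : Decidable (Pre_max_subjects_number answered needed q) := by unfold Pre_max_subjects_number; infer_instance
def pvWitness_max_subjects_number : List Int × List Int × Int := ([1, 2], [2, 3], 1)

def Spec_max_subjects_number (answered : List Int) (needed : List Int) (q : Int) (out : Int) : Prop := out = max_subjects_number_alt answered needed q
instance (answered : List Int) (needed : List Int) (q : Int) (out : Int) : Decidable (Spec_max_subjects_number answered needed q out) := by unfold Spec_max_subjects_number; infer_instance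

-- ===== CLAIM (what is proved, stated in full; the proofs are below) =====
def Claim_equal_max_subjects_number : Prop := ∀ (answered : List Int) (needed : List Int) (q : Int), Dom_max_subjects_number answered needed q → Pre_max_subjects_number answered needed q → Spec_max_subjects_number answered needed q (max_subjects_number answered needed q)

-- ===== LEMMAS AND PROOFS =====

-- the count A's greedy loop produces, as a pure function
def kA : List Int → Int → Nat
  | [], _ => 0
  | r :: S, q => if r ≤ q then kA S (q - r) + 1 else 0

theorem pvLoopA_eq_kA (S : List Int) : ∀ (q c : Int), pvLoopA S q c = c + (kA S q : Int) := by
  induction S with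
  | nil => intro q c; simp [pvLoopA, kA]
  | cons r T ih =>
    intro q c
    simp only [pvLoopA, kA]
    by_cases h : r ≤ q
    · rw [if_pos (by omega : q ≥ r), if_pos h, ih]; push_cast; ring
    · rw [if_neg (by omega : ¬ q ≥ r), if_neg h]; simp

theorem kA_le_length (S : List Int) : ∀ q, kA S q ≤ S.length := by
  induction S with
  | nil => intro q; simp [kA]
  | cons r T ih =>
    intro q; simp only [kA, List.length_cons]
    split_ifs
    · exact Nat.succ_le_succ (ih _)
    · omega

theorem kA_mono (S : List Int) : ∀ {q q' : Int}, q ≤ q' → kA S q ≤ kA S q' := by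
  induction S with
  | nil => intro q q' _; simp [kA]
  | cons r T ih =>
    intro q q' h
    simp only [kA]
    split_ifs with h1 h2 h2
    · exact Nat.succ_le_succ (ih (by omega))
    · omega
    · exact Nat.zero_le _
    · exact Nat.le_refl _

theorem sum_take_mono (S : List Int) : ∀ (j k : Nat), (∀ e ∈ S, 0 ≤ e) → j ≤ k →
    (S.take j).sum ≤ (S.take k).sum := by
  induction S with
  | nil => intro j k _ _; simp
  | cons r T ih =>
    intro j k hnn hjk
    cases j with
    | zero =>
      simp only [List.take_zero, List.sum_nil]
      have : ∀ e ∈ (r :: T).take k, 0 ≤ e := fun e he => hnn e (List.mem_of_mem_take he)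
      exact List.sum_nonneg this
    | succ j' =>
      cases k with
      | zero => omega
      | succ k' =>
        simp only [List.take_succ_cons, List.sum_cons]
        have := ih j' k' (fun e he => hnn e (by simp [he])) (by omega)
        omega

-- lower bound: any affordable prefix count is ≤ kA
theorem kA_lb (S : List Int) : ∀ (q : Int) (k : Nat), (∀ e ∈ S, 0 ≤ e) → k ≤ S.length →
    (S.take k).sum ≤ q → k ≤ kA S q := by
  induction S with
  | nil => intro q k _ h _; simp only [List.length_nil, Nat.le_zero] at h; simp [kA, h]
  | cons r T ih =>
    intro q k hnn hk hsum
    cases k with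
    | zero => exact Nat.zero_le _
    | succ k' =>
      simp only [List.take_succ_cons, List.sum_cons] at hsum
      have hTnn : ∀ e ∈ T, 0 ≤ e := fun e he => hnn e (by simp [he])
      have hts : (0:Int) ≤ (T.take k').sum :=
        List.sum_nonneg (fun e he => hTnn e (List.mem_of_mem_take he))
      have hrq : r ≤ q := by omega
      simp only [kA, if_pos hrq]
      exact Nat.succ_le_succ (ih (q - r) k' hTnn (by simpa using hk) (by omega))

-- feasibility: the kA-prefix is affordable (when nonempty)
theorem kA_feas (S : List Int) : ∀ (q : Int), (∀ e ∈ S, 0 ≤ e) → 1 ≤ kA S q →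
    (S.take (kA S q)).sum ≤ q := by
  induction S with
  | nil => intro q _ h; simp [kA] at h
  | cons r T ih =>
    intro q hnn h1
    have hTnn : ∀ e ∈ T, 0 ≤ e := fun e he => hnn e (by simp [he])
    simp only [kA] at h1 ⊢
    by_cases hrq : r ≤ q
    · rw [if_pos hrq] at h1 ⊢
      simp only [List.take_succ_cons, List.sum_cons]
      by_cases hT : 1 ≤ kA T (q - r)
      · have := ih (q - r) hTnn hT; omega
      · have : kA T (q - r) = 0 := by omega
        simp [this]; omega
    · rw [if_neg hrq] at h1; omega

-- pvInsort basics
theorem pvInsort_ne_nil (x : Int) (S : List Int) : pvInsort x S ≠ [] := by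
  cases S with
  | nil => simp [pvInsort]
  | cons y T => simp only [pvInsort]; split_ifs <;> simp

theorem pvInsort_perm (x : Int) (S : List Int) : (pvInsort x S).Perm (x :: S) := by
  induction S with
  | nil => simp [pvInsort]
  | cons y T ih =>
    simp only [pvInsort]
    split_ifs
    · exact ((ih.cons y).trans (List.Perm.swap x y T))
    · exact List.Perm.refl _

theorem pvInsort_sum (x : Int) (S : List Int) : (pvInsort x S).sum = x + S.sum := by
  have := (pvInsort_perm x S).sum_eq; simpa using this

theorem pvInsort_mem {x e : Int} {S : List Int} (h : e ∈ pvInsort x S) : e = x ∨ e ∈ S := by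
  have := (pvInsort_perm x S).mem_iff.mp h; simpa using this

theorem pvInsort_nonneg {x : Int} {S : List Int} (hx : 0 ≤ x) (hS : ∀ e ∈ S, 0 ≤ e) :
    ∀ e ∈ pvInsort x S, 0 ≤ e := by
  intro e he
  rcases pvInsort_mem he with rfl | h
  · exact hx
  · exact hS e h

theorem pvInsort_pairwise {x : Int} {S : List Int} (hS : S.Pairwise (· ≤ ·)) :
    (pvInsort x S).Pairwise (· ≤ ·) := by
  induction S with
  | nil => simp [pvInsort]
  | cons y T ih =>
    rcases List.pairwise_cons.mp hS with ⟨hy, hT⟩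
    simp only [pvInsort]
    split_ifs with h
    · refine List.pairwise_cons.mpr ⟨?_, ih hT⟩
      intro e he
      rcases pvInsort_mem he with rfl | hm
      · exact h
      · exact hy e hm
    · refine List.pairwise_cons.mpr ⟨?_, hS⟩
      intro e he
      rcases List.mem_cons.mp he with rfl | hm
      · omega
      · have := hy e hm; omega

-- getLastD helpers
theorem getLastD_cons_ne_nil {a : Int} {l : List Int} (h : l ≠ []) :
    (a :: l).getLastD 0 = l.getLastD 0 := by
  cases l with
  | nil => exact absurd rfl h
  | cons b m => simp

theorem sum_dropLast_add_getLastD {K : List Int} (h : K ≠ []) :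
    K.sum = K.dropLast.sum + K.getLastD 0 := by
  induction K with
  | nil => exact absurd rfl h
  | cons a l ih =>
    cases l with
    | nil => simp
    | cons b m =>
      rw [List.dropLast_cons₂, getLastD_cons_ne_nil (by simp)]
      simp only [List.sum_cons] at ih ⊢
      rw [ih (by simp)]; ring

theorem getLastD_mem {K : List Int} (h : K ≠ []) : K.getLastD 0 ∈ K := by
  induction K with
  | nil => exact absurd rfl h
  | cons a l ih =>
    cases l with
    | nil => simp
    | cons b m =>
      rw [getLastD_cons_ne_nil (by simp)]
      exact List.mem_cons_of_mem a (ih (by simp))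

theorem dropLast_cons_ne_nil {a : Int} {l : List Int} (h : l ≠ []) :
    (a :: l).dropLast = a :: l.dropLast := by
  cases l with
  | nil => exact absurd rfl h
  | cons b m => simp [List.dropLast_cons₂]

theorem dropLast_take {S : List Int} {k : Nat} (hk : k ≤ S.length) :
    (S.take k).dropLast = S.take (k - 1) := by
  rw [List.dropLast_eq_take, List.take_take, List.length_take]
  congr 1; omega

-- THE STEP LEMMA: one B-iteration preserves "kept = cheapest affordable prefix".
-- S is the sorted pool of costs seen so far, kA S q its greedy count, x the new cost.
theorem step_lemma (x : Int) (hx : 0 ≤ x) : ∀ (S : List Int) (q : Int),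
    S.Pairwise (· ≤ ·) → (∀ e ∈ S, 0 ≤ e) →
    (x + (S.take (kA S q)).sum ≤ q →
       kA (pvInsort x S) q = kA S q + 1 ∧
       (pvInsort x S).take (kA S q + 1) = pvInsort x (S.take (kA S q))) ∧
    (¬ (x + (S.take (kA S q)).sum ≤ q) →
       kA (pvInsort x S) q = kA S q ∧
       (pvInsort x S).take (kA S q) = (pvInsort x (S.take (kA S q))).dropLast ∧
       ((pvInsort x S).take (kA S q)).sum
         = (S.take (kA S q)).sum + x - (pvInsort x (S.take (kA S q))).getLastD 0) := by
  intro S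
  induction S with
  | nil =>
    intro q _ _
    constructor
    · intro h
      simp only [kA, List.take_nil, List.sum_nil] at h ⊢
      simp [pvInsort, kA, show x ≤ q by omega]
    · intro h
      simp only [kA, List.take_nil, List.sum_nil] at h ⊢
      refine ⟨by simp [pvInsort, kA, show ¬ x ≤ q by omega], by simp [pvInsort], by simp [pvInsort]⟩
  | cons y T ih =>
    intro q hsort hnn
    rcases List.pairwise_cons.mp hsort with ⟨hy, hTsort⟩
    have hTnn : ∀ e ∈ T, 0 ≤ e := fun e he => hnn e (by simp [he])
    have hy0 : (0:Int) ≤ y := hnn y (by simp)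
    by_cases hyx : y ≤ x
    · -- x is inserted somewhere in the tail: S' = y :: pvInsort x T
      have hins : pvInsort x (y :: T) = y :: pvInsort x T := by simp [pvInsort, hyx]
      by_cases hyq : y ≤ q
      · have hkS : kA (y :: T) q = kA T (q - y) + 1 := by simp [kA, hyq]
        have hkS' : kA (y :: pvInsort x T) q = kA (pvInsort x T) (q - y) + 1 := by
          simp [kA, hyq]
        have hIH := ih (q - y) hTsort hTnn
        constructor
        · intro h
          rw [hkS, List.take_succ_cons, List.sum_cons] at h
          obtain ⟨hk1, ht1⟩ := hIH.1 (by omega)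
          constructor
          · rw [hins, hkS', hk1, hkS]
          · rw [hins, hkS, List.take_succ_cons, List.take_succ_cons, ht1]
            simp [pvInsort, hyx]
        · intro h
          rw [hkS, List.take_succ_cons, List.sum_cons] at h
          obtain ⟨hk2, ht2, hs2⟩ := hIH.2 (by omega)
          have hinsT : pvInsort x (y :: T.take (kA T (q - y)))
              = y :: pvInsort x (T.take (kA T (q - y))) := by simp [pvInsort, hyx]
          refine ⟨?_, ?_, ?_⟩
          · rw [hins, hkS', hk2, hkS]
          · rw [hins, hkS, List.take_succ_cons, List.take_succ_cons, ht2, hinsT,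
              dropLast_cons_ne_nil (pvInsort_ne_nil x _)]
          · rw [hins, hkS, List.take_succ_cons, List.take_succ_cons, List.sum_cons,
              List.sum_cons, hs2, hinsT, getLastD_cons_ne_nil (pvInsort_ne_nil x _)]
            ring
      · -- y > q: nothing is affordable, and x ≥ y > q
        have hxq : ¬ x ≤ q := by omega
        have hkS : kA (y :: T) q = 0 := by simp [kA, hyq]
        have hkS' : kA (y :: pvInsort x T) q = 0 := by simp [kA, hyq]
        constructor
        · intro h
          rw [hkS, List.take_zero, List.sum_nil] at h
          omega
        · intro _
          rw [hins, hkS]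
          exact ⟨hkS', by simp [pvInsort], by simp [pvInsort]⟩
    · -- x < y: x goes to the very front, S' = x :: y :: T
      have hins : pvInsort x (y :: T) = x :: y :: T := by simp [pvInsort, hyx]
      have hgeS : ∀ e ∈ y :: T, y ≤ e := by
        intro e he
        rcases List.mem_cons.mp he with rfl | hm
        · exact le_refl e
        · exact hy e hm
      have hinsK : ∀ k : Nat, pvInsort x ((y :: T).take k) = x :: (y :: T).take k := by
        intro k
        cases hK : (y :: T).take k with
        | nil => simp [pvInsort]
        | cons a l =>
          have ha : a ∈ y :: T := List.mem_of_mem_take (hK ▸ List.mem_cons_self)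
          have hax : ¬ a ≤ x := by have := hgeS a ha; omega
          simp [pvInsort, hax]
      have hKnn : (0:Int) ≤ ((y :: T).take (kA (y :: T) q)).sum :=
        List.sum_nonneg (fun e he => hnn e (List.mem_of_mem_take he))
      have hkX : ∀ r : Int, x ≤ r → kA (x :: y :: T) r = kA (y :: T) (r - x) + 1 := by
        intro r hr; simp [kA, hr]
      constructor
      · intro h
        have hxq : x ≤ q := by omega
        have hkeq : kA (y :: T) (q - x) = kA (y :: T) q := by
          have hle := kA_mono (y :: T) (show q - x ≤ q by omega)
          have hge := kA_lb (y :: T) (q - x) (kA (y :: T) q) hnn (kA_le_length _ _) (by omega)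
          omega
        refine ⟨?_, ?_⟩
        · rw [hins, hkX q hxq, hkeq]
        · rw [hins, hinsK, List.take_succ_cons]
      · intro h
        by_cases hk0 : kA (y :: T) q = 0
        · have hxq : ¬ x ≤ q := by
            rw [hk0, List.take_zero, List.sum_nil] at h; omega
          have hk0' : kA (x :: y :: T) q = 0 := by simp [kA, hxq]
          rw [hins, hinsK, hk0, hk0']
          exact ⟨rfl, rfl, by simp⟩
        · obtain ⟨k', hk'⟩ : ∃ k', kA (y :: T) q = k' + 1 :=
            ⟨kA (y :: T) q - 1, by omega⟩
          have hk1 : 1 ≤ kA (y :: T) q := by omega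
          have hklen := kA_le_length (y :: T) q
          have hfeas := kA_feas (y :: T) q hnn hk1
          have hKne : (y :: T).take (kA (y :: T) q) ≠ [] := by
            rw [hk', List.take_succ_cons]; simp
          have hlast_mem : ((y :: T).take (kA (y :: T) q)).getLastD 0 ∈ y :: T :=
            List.mem_of_mem_take (getLastD_mem hKne)
          have hlast_gt : x < ((y :: T).take (kA (y :: T) q)).getLastD 0 := by
            have := hgeS _ hlast_mem; omega
          have hdrop : ((y :: T).take (kA (y :: T) q)).dropLast = (y :: T).take k' := by
            rw [dropLast_take hklen, hk']; simp
          have hsplit : ((y :: T).take (kA (y :: T) q)).sum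
              = ((y :: T).take k').sum + ((y :: T).take (kA (y :: T) q)).getLastD 0 := by
            rw [← hdrop]; exact sum_dropLast_add_getLastD hKne
          have hyq : y ≤ q := by
            by_contra hc
            have : kA (y :: T) q = 0 := by simp [kA, hc]
            omega
          have hxq : x ≤ q := by omega
          have hkeq : kA (y :: T) (q - x) = k' := by
            have hge := kA_lb (y :: T) (q - x) k' hnn (by omega) (by omega)
            have hle : kA (y :: T) (q - x) ≤ k' := by
              by_contra hc
              have h1 : 1 ≤ kA (y :: T) (q - x) := by omega
              have h2 := kA_feas (y :: T) (q - x) hnn h1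
              have h3 := sum_take_mono (y :: T) (kA (y :: T) q) (kA (y :: T) (q - x)) hnn
                (by omega)
              omega
            omega
          rw [hk'] at hKne hdrop hsplit hlast_gt hfeas h
          rw [hins, hk']
          refine ⟨?_, ?_, ?_⟩
          · rw [hkX q hxq, hkeq]
          · rw [hinsK, List.take_succ_cons, dropLast_cons_ne_nil hKne, hdrop]
          · rw [hinsK, List.take_succ_cons, List.sum_cons, getLastD_cons_ne_nil hKne]
            omega

-- cost-list form of B's loop, and the bridge from the zip form
def pvLoopC (q : Int) : List Int → List Int → Int → Int
  | [], kept, _ => (kept.length : Int)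
  | c :: rest, kept, total =>
    let k' := pvInsort c kept
    let t' := total + c
    if t' > q then pvLoopC q rest k'.dropLast (t' - k'.getLastD 0)
    else pvLoopC q rest k' t'

theorem pvLoopB_eq_pvLoopC (q : Int) : ∀ (ps : List (Int × Int)) (kept : List Int) (t : Int),
    pvLoopB q ps kept t = pvLoopC q (ps.map (fun p => max 0 (p.2 - p.1))) kept t := by
  intro ps
  induction ps with
  | nil => intro kept t; simp [pvLoopB, pvLoopC]
  | cons p rest ih =>
    intro kept t
    simp only [pvLoopB, pvLoopC, List.map_cons]
    split_ifs <;> apply ih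

-- MAIN INVARIANT: B's loop, started on the cheapest affordable prefix of the
-- sorted pool S, computes the greedy count of the pool extended by the rest.
theorem main_invariant (q : Int) : ∀ (l : List Int) (S : List Int),
    S.Pairwise (· ≤ ·) → (∀ e ∈ S, 0 ≤ e) → (∀ e ∈ l, 0 ≤ e) →
    pvLoopC q l (S.take (kA S q)) ((S.take (kA S q)).sum)
      = (kA (l.foldl (fun s x => pvInsort x s) S) q : Int) := by
  intro l
  induction l with
  | nil =>
    intro S _ _ _
    simp only [List.foldl_nil, pvLoopC]
    rw [List.length_take]
    have := kA_le_length S q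
    congr 1
    omega
  | cons c rest ih =>
    intro S hsort hnn hlnn
    have hc : (0:Int) ≤ c := hlnn c (by simp)
    have hrnn : ∀ e ∈ rest, (0:Int) ≤ e := fun e he => hlnn e (by simp [he])
    have hstep := step_lemma c hc S q hsort hnn
    simp only [List.foldl_cons, pvLoopC]
    by_cases hcond : (S.take (kA S q)).sum + c > q
    · rw [if_pos hcond]
      obtain ⟨hk, htake, hsum⟩ := hstep.2 (by omega)
      rw [← htake, ← hsum, show kA S q = kA (pvInsort c S) q from hk.symm]
      exact ih (pvInsort c S) (pvInsort_pairwise hsort) (pvInsort_nonneg hc hnn) hrnn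
    · rw [if_neg hcond]
      obtain ⟨hk, htake⟩ := hstep.1 (by omega)
      have hsum' : (S.take (kA S q)).sum + c = ((pvInsort c S).take (kA S q + 1)).sum := by
        rw [htake, pvInsort_sum]; ring
      rw [← htake, hsum', show kA S q + 1 = kA (pvInsort c S) q from hk.symm]
      exact ih (pvInsort c S) (pvInsort_pairwise hsort) (pvInsort_nonneg hc hnn) hrnn

-- A's step-1 fold builds exactly the zipped cost list (proved via index extensionality)
theorem remaining_eq (answered needed : List Int) (h : answered.length ≤ needed.length) :
    (PySem.List.pyRange 0 (answered.length : Int) 1).foldl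
      (fun acc i => acc ++ [max 0 (PySem.List.pyGetD needed i 0 - PySem.List.pyGetD answered i 0)]) []
    = (answered.zip needed).map (fun p => max 0 (p.2 - p.1)) := by
  rw [PySem.List.foldl_append_singleton_eq_map]
  rw [PySem.List.pyRange_zero_nat]
  rw [List.map_map]
  apply List.ext_getElem
  · simp [List.length_zip]; omega
  · intro i h1 h2
    simp only [List.nil_append, List.getElem_map, List.getElem_range, Function.comp_apply,
      PySem.List.pyGetD_natCast, List.getElem_zip]
    have hi : i < answered.length := by simpa using h1
    rw [List.getD_eq_getElem needed 0 (by omega), List.getD_eq_getElem answered 0 hi]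

-- the insertion-built pool is sorted and a permutation of its input
theorem foldl_insort_perm : ∀ (l S : List Int),
    (l.foldl (fun s x => pvInsort x s) S).Perm (S ++ l) := by
  intro l
  induction l with
  | nil => intro S; simp
  | cons x rest ih =>
    intro S
    simp only [List.foldl_cons]
    refine (ih (pvInsort x S)).trans ?_
    have h1 : (pvInsort x S ++ rest).Perm ((x :: S) ++ rest) :=
      (pvInsort_perm x S).append_right rest
    refine h1.trans ?_
    simp only [List.cons_append]
    exact (List.perm_middle).symm

theorem foldl_insort_pairwise : ∀ (l S : List Int), S.Pairwise (· ≤ ·) →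
    (l.foldl (fun s x => pvInsort x s) S).Pairwise (· ≤ ·) := by
  intro l
  induction l with
  | nil => intro S h; simpa using h
  | cons x rest ih =>
    intro S h
    simp only [List.foldl_cons]
    exact ih _ (pvInsort_pairwise h)

-- ===== VERDICT (by name: the statement is the Claim_ definition above) =====
theorem max_subjects_number_spec : Claim_equal_max_subjects_number := by
  intro answered needed q _ hpre
  unfold Spec_max_subjects_number max_subjects_number max_subjects_number_alt
  simp only []
  rw [remaining_eq answered needed hpre]
  set costs := (answered.zip needed).map (fun p => max 0 (p.2 - p.1)) with hcosts
  have hnn : ∀ e ∈ costs, (0:Int) ≤ e := by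
    intro e he
    rcases List.mem_map.mp he with ⟨p, _, rfl⟩
    exact le_max_left 0 _
  rw [pvLoopB_eq_pvLoopC, ← hcosts]
  have hmain := main_invariant q costs [] (by simp) (by simp) hnn
  simp only [kA, List.take_nil, List.sum_nil] at hmain
  rw [hmain]
  rw [pvLoopA_eq_kA]
  have heq : PySem.List.sorted costs (fun x => x) false
      = costs.foldl (fun s x => pvInsort x s) [] := by
    apply PySem.List.sorted_id_eq_of_perm_of_pairwise
    · exact (foldl_insort_perm costs []).trans (by simp)
    · exact foldl_insort_pairwise costs [] (by simp)
  rw [heq]; ring
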